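-- pv_equiv track=rewrite | github.com/Amorality777/algorithms | practicum/sprint_1/a.py | street_counter
-- ===== SOURCE A (Python) =====
-- def street_counter(s: list[int]) -> list[int]:
--     last_empty = None
--     nxt = 1
--     for i in range(len(s)):
--         if s[i] != 0:
--             s[i] = nxt
--             nxt += 1
--         else:
--             left_bord = -1 if last_empty is None else (last_empty + i) // 2
--             for count, j in enumerate(range(i - 1, left_bord, -1), start=1):
--                 s[j] = count
--             last_empty = i
--             nxt = 1
--
--     return s
-- ===== SOURCE B (Python) =====
-- def street_counter(s: list[int]) -> list[int]:
--     n = len(s)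
--     if 0 not in s:
--         for i in range(n):
--             s[i] = i + 1
--         return s
--     big = n + 1
--     right = [0] * n
--     d = big
--     for i in range(n - 1, -1, -1):
--         d = 0 if s[i] == 0 else d + 1
--         right[i] = d
--     d = big
--     for i in range(n):
--         d = 0 if s[i] == 0 else d + 1
--         s[i] = min(d, right[i])
--     return s
-- ===== Notes on version B (the rewrite author's own statement) =====
-- stated objective: alternative
-- what changed: Replaces A's in-place back-fill with midpoint floor-division on each zero by two independent linear scans (left and right nearest-zero distance, then pointwise min), with a separate uniform numbering branch when the street has no empty lot.
import Mathlib
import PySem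

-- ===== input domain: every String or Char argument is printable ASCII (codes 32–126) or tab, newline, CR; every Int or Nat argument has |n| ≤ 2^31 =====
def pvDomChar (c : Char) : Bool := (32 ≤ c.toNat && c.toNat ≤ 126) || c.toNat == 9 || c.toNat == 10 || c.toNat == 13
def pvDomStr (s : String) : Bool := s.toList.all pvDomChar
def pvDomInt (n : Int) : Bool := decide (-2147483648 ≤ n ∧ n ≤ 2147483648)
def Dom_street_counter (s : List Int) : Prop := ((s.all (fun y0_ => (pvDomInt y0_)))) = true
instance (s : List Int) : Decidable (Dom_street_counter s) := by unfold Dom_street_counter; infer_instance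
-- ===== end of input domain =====

-- B replaces A's per-zero in-place back-fill (with its floor-division midpoint) by two independent
-- linear nearest-zero scans combined with a pointwise min; both mutate the argument list in Python,
-- the equivalence proved here is about the returned value.

-- ===== PORT A =====
def aStep (st : List Int × Option Int × Int) (i : Int) : List Int × Option Int × Int :=
  match st with
  | (cur, last_empty, nxt) =>
    if PySem.List.pyGetD cur i 0 ≠ 0 then
      (PySem.List.pySetD cur i nxt, last_empty, nxt + 1)
    else
      let left_bord : Int := match last_empty with
        | none => -1
        | some le => PySem.Int.floordiv (le + i) 2
      let filled := ((PySem.List.pyRange (i-1) left_bord (-1)).foldl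
          (fun (p : Int × List Int) j => (p.1 + 1, PySem.List.pySetD p.2 j p.1)) (1, cur)).2
      (filled, some i, 1)

def street_counter (s : List Int) : List Int :=
  ((PySem.List.pyRange 0 (s.length : Int) 1).foldl aStep (s, none, 1)).1

-- ===== PORT B =====
def bStepR (s : List Int) (p : Int × List Int) (i : Int) : Int × List Int :=
  let d := if PySem.List.pyGetD s i 0 = 0 then 0 else p.1 + 1
  (d, PySem.List.pySetD p.2 i d)

def bStepL (right : List Int) (p : Int × List Int) (i : Int) : Int × List Int :=
  let d := if PySem.List.pyGetD p.2 i 0 = 0 then 0 else p.1 + 1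
  (d, PySem.List.pySetD p.2 i (min d (PySem.List.pyGetD right i 0)))

def street_counter_alt (s : List Int) : List Int :=
  let n : Int := s.length
  if ¬ (s.contains 0) then
    (PySem.List.pyRange 0 n 1).foldl (fun cur i => PySem.List.pySetD cur i (i + 1)) s
  else
    let big : Int := n + 1
    let right := ((PySem.List.pyRange (n-1) (-1) (-1)).foldl (bStepR s) (big, List.replicate s.length 0)).2
    ((PySem.List.pyRange 0 n 1).foldl (bStepL right) (big, s)).2

-- ===== PRECONDITION & SPEC =====
def Spec_street_counter (s : List Int) (out : List Int) : Prop := out = street_counter_alt s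
instance (s : List Int) (out : List Int) : Decidable (Spec_street_counter s out) := by unfold Spec_street_counter; infer_instance

-- ===== CLAIM (what is proved, stated in full; the proofs are below) =====
def Claim_equal_street_counter : Prop := ∀ (s : List Int), Dom_street_counter s → Spec_street_counter s (street_counter s)

-- ===== LEMMAS AND PROOFS =====

-- element at Nat index (all accesses below are in range)
def elemAt (s : List Int) (j : Nat) : Int := PySem.List.pyGetD s (j : Int) 0

-- index of the last zero strictly below i, if any
def lzB (s : List Int) : Nat → Option Nat
  | 0 => none
  | i+1 => if elemAt s i = 0 then some i else lzB s i

-- index of the first zero in [a, b), if any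
def fzI (s : List Int) (a : Nat) : Nat → Option Nat
  | 0 => none
  | b+1 => match fzI s a b with
    | some z => some z
    | none => if a ≤ b ∧ elemAt s b = 0 then some b else none

-- value of cell j after A has processed the prefix [0, i)  (for j < i)
def valI (s : List Int) (i j : Nat) : Int :=
  if elemAt s j = 0 then 0 else
  match lzB s j, fzI s (j+1) i with
  | none, none => (j : Int) + 1
  | some z, none => (j : Int) - z
  | none, some z => (z : Int) - j
  | some z, some z' => min ((j : Int) - z) ((z' : Int) - j)

def curA (s : List Int) (i : Nat) : List Int :=
  (List.range s.length).map (fun j => if j < i then valI s i j else elemAt s j)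

def olzI (s : List Int) (i : Nat) : Option Int := (lzB s i).map (fun L => (L : Int))

def nxtI (s : List Int) (i : Nat) : Int :=
  match lzB s i with
  | none => (i : Int) + 1
  | some L => (i : Int) - L

-- B-side running distances
def Rd (s : List Int) (m : Nat) : Int :=
  match fzI s m s.length with
  | some z => (z : Int) - m
  | none => ((s.length : Int) + 1) + ((s.length : Int) - m)

def Ld (s : List Int) (k : Nat) : Int :=
  match lzB s k with
  | some z => ((k : Int) - 1) - z
  | none => ((s.length : Int) + 1) + k

def outB (s : List Int) (j : Nat) : Int := min (Ld s (j+1)) (Rd s j)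

def refOut (s : List Int) : List Int := (List.range s.length).map (fun j => valI s s.length j)

-- basic facts
lemma map_elemAt_range (s : List Int) : (List.range s.length).map (fun j => elemAt s j) = s := by
  apply List.ext_getElem
  · simp
  · intro i h1 h2
    simp only [List.getElem_map, List.getElem_range, elemAt, PySem.List.pyGetD_natCast,
      List.getD_eq_getElem?_getD, List.getElem?_eq_getElem h2]
    rfl

lemma elemAt_eq (s : List Int) (j : Nat) (h : j < s.length) : elemAt s j = s[j] := by
  simp [elemAt, PySem.List.pyGetD_natCast, List.getD_eq_getElem?_getD, List.getElem?_eq_getElem h]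

lemma lzB_lt (s : List Int) (i L : Nat) (h : lzB s i = some L) : L < i ∧ elemAt s L = 0 := by
  induction i with
  | zero => simp [lzB] at h
  | succ i ih =>
    simp only [lzB] at h
    split at h
    · cases h; exact ⟨Nat.lt_succ_self _, by assumption⟩
    · rcases ih h with ⟨h1, h2⟩; exact ⟨Nat.lt_succ_of_lt h1, h2⟩

lemma lzB_none (s : List Int) (i : Nat) (h : lzB s i = none) : ∀ k < i, elemAt s k ≠ 0 := by
  induction i with
  | zero => omega
  | succ i ih =>
    simp only [lzB] at h
    split at h
    · cases h
    · intro k hk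
      rcases Nat.lt_succ_iff_lt_or_eq.1 hk with hk' | rfl
      · exact ih h k hk'
      · assumption

lemma lzB_le (s : List Int) (i k : Nat) (hk : k < i) (hz : elemAt s k = 0) :
    ∃ L, lzB s i = some L ∧ k ≤ L := by
  induction i with
  | zero => omega
  | succ i ih =>
    simp only [lzB]
    split
    · exact ⟨i, rfl, by omega⟩
    · have hk' : k < i := by
        rcases Nat.lt_succ_iff_lt_or_eq.1 hk with h | rfl
        · exact h
        · simp_all
      rcases ih hk' with ⟨L, h1, h2⟩; exact ⟨L, h1, h2⟩

lemma lzB_stable (s : List Int) (j i : Nat) (hj : j ≤ i)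
    (h : ∀ k, j ≤ k → k < i → elemAt s k ≠ 0) : lzB s i = lzB s j := by
  induction i with
  | zero => have : j = 0 := by omega
            simp [this]
  | succ i ih =>
    rcases Nat.lt_succ_iff_lt_or_eq.1 (Nat.lt_succ_of_le hj) with hj' | rfl
    · have hji : j ≤ i := by omega
      simp only [lzB]
      rw [if_neg (h i hji (Nat.lt_succ_self _))]
      exact ih hji (fun k h1 h2 => h k h1 (by omega))
    · rfl

lemma fzI_spec (s : List Int) (a b z : Nat) (h : fzI s a b = some z) :
    a ≤ z ∧ z < b ∧ elemAt s z = 0 := by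
  induction b with
  | zero => simp [fzI] at h
  | succ b ih =>
    simp only [fzI] at h
    split at h
    · rename_i heq
      cases h
      rcases ih heq with ⟨h1, h2, h3⟩; exact ⟨h1, by omega, h3⟩
    · split at h
      · rename_i hc
        rw [Option.some_inj] at h
        subst h
        exact ⟨hc.1, by omega, hc.2⟩
      · cases h

lemma fzI_none (s : List Int) (a b : Nat) (h : fzI s a b = none) :
    ∀ k, a ≤ k → k < b → elemAt s k ≠ 0 := by
  induction b with
  | zero => omega
  | succ b ih =>
    simp only [fzI] at h
    split at h
    · cases h
    · rename_i heq
      intro k h1 h2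
      rcases Nat.lt_succ_iff_lt_or_eq.1 h2 with h2' | rfl
      · exact ih heq k h1 h2'
      · split at h
        · cases h
        · rename_i hc; intro hz; exact hc ⟨h1, hz⟩

lemma fzI_eq_none_of_le (s : List Int) (a b : Nat) (h : b ≤ a) : fzI s a b = none := by
  induction b with
  | zero => rfl
  | succ b ih =>
    simp only [fzI]
    rw [ih (by omega)]
    simp; omega

lemma fzI_self (s : List Int) (a b : Nat) (hab : a < b) (hz : elemAt s a = 0) :
    fzI s a b = some a := by
  induction b with
  | zero => omega
  | succ b ih =>
    simp only [fzI]
    rcases Nat.lt_succ_iff_lt_or_eq.1 hab with h | rfl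
    · rw [ih h]
    · rw [fzI_eq_none_of_le s a a le_rfl]
      simp [hz]

lemma fzI_shift (s : List Int) (a b : Nat) (hz : elemAt s a ≠ 0) :
    fzI s a b = fzI s (a+1) b := by
  induction b with
  | zero => rfl
  | succ b ih =>
    simp only [fzI, ih]
    split
    · rfl
    · by_cases hab : a = b
      · subst hab; simp [hz]
      · by_cases h1 : a ≤ b
        · have : (a ≤ b ∧ elemAt s b = 0) ↔ (a+1 ≤ b ∧ elemAt s b = 0) := by
            constructor <;> rintro ⟨u,v⟩ <;> exact ⟨by omega, v⟩
          simp only [this]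
        · have h2 : ¬ (a+1 ≤ b) := by omega
          simp [h1, h2]

lemma Ld_succ (s : List Int) (j : Nat) :
    Ld s (j+1) = if elemAt s j = 0 then 0 else Ld s j + 1 := by
  unfold Ld
  simp only [lzB]
  by_cases hz : elemAt s j = 0
  · simp [hz]
  · rw [if_neg hz, if_neg hz]
    cases h : lzB s j <;> simp [h] <;> push_cast <;> ring


lemma fzI_succ_ne (s : List Int) (a b : Nat) (hz : elemAt s b ≠ 0) :
    fzI s a (b+1) = fzI s a b := by
  simp only [fzI]
  cases h : fzI s a b <;> simp [hz]

lemma elemAt_curA (s : List Int) (i j : Nat) (hj : j < s.length) :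
    elemAt (curA s i) j = if j < i then valI s i j else elemAt s j := by
  simp only [curA, elemAt, PySem.List.pyGetD_natCast]
  rw [PySem.List.getD_map_range _ _ _ _ hj]

lemma lzB_succ_ne (s : List Int) (i : Nat) (hz : elemAt s i ≠ 0) : lzB s (i+1) = lzB s i := by
  simp [lzB, hz]

lemma valI_self (s : List Int) (i : Nat) (hz : elemAt s i ≠ 0) : valI s (i+1) i = nxtI s i := by
  unfold valI nxtI
  rw [if_neg hz, fzI_eq_none_of_le s (i+1) (i+1) le_rfl]
  cases h : lzB s i <;> simp

-- the back-fill inner loop of A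
lemma backfill_spec (a b c : Int) (cur : List Int) (hb : -1 ≤ b) :
    ((PySem.List.pyRange a b (-1)).foldl
        (fun (p : Int × List Int) j => (p.1 + 1, PySem.List.pySetD p.2 j p.1)) (c, cur)).2
    = (List.range cur.length).map
        (fun (j : Nat) => if b < (j:Int) ∧ (j:Int) ≤ a then c + (a - (j:Int)) else elemAt cur j) := by
  by_cases h : a ≤ b
  · rw [PySem.List.pyRange_neg_one_eq_nil h]
    simp only [List.foldl_nil]
    apply List.ext_getElem
    · simp
    · intro i h1 h2
      simp only [List.getElem_map, List.getElem_range]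
      rw [if_neg (by omega)]
      simp [elemAt, PySem.List.pyGetD_natCast, List.getD_eq_getElem?_getD, List.getElem?_eq_getElem h1]
  · replace h : b < a := by omega
    have key : ∀ (k : Nat) (a c : Int) (cur : List Int), a - b = k → -1 ≤ b →
        ((PySem.List.pyRange a b (-1)).foldl
          (fun (p : Int × List Int) j => (p.1 + 1, PySem.List.pySetD p.2 j p.1)) (c, cur)).2
        = (List.range cur.length).map
            (fun (j : Nat) => if b < (j:Int) ∧ (j:Int) ≤ a then c + (a - (j:Int)) else elemAt cur j) := by
      intro k
      induction k with
      | zero =>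
        intro a c cur hk hb'
        rw [PySem.List.pyRange_neg_one_eq_nil (by omega)]
        simp only [List.foldl_nil]
        apply List.ext_getElem
        · simp
        · intro i h1 h2
          simp only [List.getElem_map, List.getElem_range]
          rw [if_neg (by omega)]
          simp [elemAt, PySem.List.pyGetD_natCast, List.getD_eq_getElem?_getD, List.getElem?_eq_getElem h1]
      | succ k ih =>
        intro a c cur hk hb'
        rw [PySem.List.pyRange_neg_one_cons (by omega), List.foldl_cons]
        have := ih (a-1) (c+1) (PySem.List.pySetD cur a c) (by omega) hb'
        simp only at this ⊢
        rw [this]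
        apply List.ext_getElem
        · simp [PySem.List.length_pySetD]
        · intro i h1 h2
          simp only [List.getElem_map, List.getElem_range]
          have hlen : (PySem.List.pySetD cur a c).length = cur.length := PySem.List.length_pySetD _ _ _
          rw [hlen] at h1
          have hi : i < cur.length := by simpa using h1
          by_cases hcase : b < (i:Int) ∧ (i:Int) ≤ a - 1
          · rw [if_pos hcase, if_pos ⟨hcase.1, by omega⟩]; ring
          · rw [if_neg hcase]
            by_cases heq : (i:Int) = a
            · rw [if_pos ⟨by omega, by omega⟩]
              have ha : a = ((a.toNat : Nat) : Int) := by omega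
              simp only [elemAt]
              rw [heq]
              rw [ha, PySem.List.pyGetD_natCast, PySem.List.pySetD_natCast]
              have : a.toNat < cur.length := by omega
              rw [List.getD_eq_getElem?_getD, List.getElem?_set_self (by omega)]
              simp
            · rw [if_neg (by omega)]
              simp only [elemAt, PySem.List.pyGetD_natCast]
              have ha : a = ((a.toNat : Nat) : Int) := by omega
              rw [ha, PySem.List.pySetD_natCast]
              rw [List.getD_eq_getElem?_getD, List.getD_eq_getElem?_getD,
                  List.getElem?_set_ne (by omega)]
    exact key (a-b).toNat a c cur (by omega) hb

lemma A_fill (s : List Int) (i : Nat) (hi : i < s.length) (hz : elemAt s i = 0) (lb : Int)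
    (hlb : lb = match lzB s i with | none => -1 | some L => ((L:Int) + (i:Int))/2) :
    (List.range s.length).map
      (fun (j : Nat) => if lb < (j:Int) ∧ (j:Int) ≤ (i:Int) - 1 then 1 + ((i:Int) - 1 - (j:Int))
        else elemAt (curA s i) j)
    = curA s (i+1) := by
  conv_rhs => rw [curA]
  apply List.map_congr_left
  intro j hjr
  have hj : j < s.length := List.mem_range.mp hjr
  rcases lt_trichotomy j i with hji | rfl | hji
  · -- j < i
    have hfz : fzI s (j+1) (i+1) = match fzI s (j+1) i with
        | some z => some z
        | none => some i := by
      simp only [fzI]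
      cases h : fzI s (j+1) i <;> simp [hz, (show j+1 ≤ i by omega)]
    rw [elemAt_curA s i j hj, if_pos hji]
    by_cases hzj : elemAt s j = 0
    · -- a zero stays zero, and lies at or below the midpoint
      rcases lzB_le s i j hji hzj with ⟨L, hL, hjL⟩
      rw [hL] at hlb
      have hlb' : lb = ((L:Int) + (i:Int))/2 := hlb
      rw [if_neg (by omega), if_pos (by omega)]
      simp only [valI, if_pos hzj]
    · cases hf : fzI s (j+1) i with
      | some z' =>
        -- a zero strictly between j and i: value unchanged
        rcases fzI_spec s (j+1) i z' hf with ⟨h1, h2, h3⟩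
        rcases lzB_le s i z' h2 h3 with ⟨L, hL, hzL⟩
        rw [hL] at hlb
        have hlb' : lb = ((L:Int) + (i:Int))/2 := hlb
        rw [if_neg (by omega), if_pos (by omega)]
        simp only [valI, if_neg hzj, hfz, hf]
      | none =>
        have hnoz : ∀ k, j ≤ k → k < i → elemAt s k ≠ 0 := by
          intro k hk1 hk2
          rcases Nat.eq_or_lt_of_le hk1 with rfl | hk1'
          · exact hzj
          · exact fzI_none s (j+1) i hf k (by omega) hk2
        have hstab : lzB s i = lzB s j := lzB_stable s j i (by omega) hnoz
        cases hl : lzB s i with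
        | some L =>
          have hlj : lzB s j = some L := by rw [← hstab, hl]
          have hLj : L < j := (lzB_lt s j L hlj).1
          rw [hl] at hlb
          have hlb' : lb = ((L:Int) + (i:Int))/2 := hlb
          simp only [valI, if_neg hzj, hfz, hf, hlj, min_def]
          split_ifs <;> omega
        | none =>
          have hlj : lzB s j = none := by rw [← hstab, hl]
          rw [hl] at hlb
          have hlb' : lb = (-1 : Int) := hlb
          rw [if_pos (by constructor <;> omega)]
          simp only [valI, if_neg hzj, hfz, hf, hlj]
          omega
  · -- j = i
    rw [if_neg (by omega), if_pos (by omega), elemAt_curA s j j hj, if_neg (by omega)]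
    simp [valI, hz]
  · -- j > i
    rw [if_neg (by omega), elemAt_curA s i j hj, if_neg (by omega), if_neg (by omega)]

lemma A_step (s : List Int) (i : Nat) (hi : i < s.length) :
    aStep (curA s i, olzI s i, nxtI s i) (i : Int) = (curA s (i+1), olzI s (i+1), nxtI s (i+1)) := by
  have hlen : (curA s i).length = s.length := by simp [curA]
  have hget : PySem.List.pyGetD (curA s i) (i : Int) 0 = elemAt s i := by
    have := elemAt_curA s i i hi
    simpa [elemAt] using this
  by_cases hz : elemAt s i = 0
  · -- empty lot at i: back-fill
    simp only [aStep, hget, hz, ne_eq, not_true_eq_false, if_false]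
    cases hL : lzB s i with
    | none =>
      have holz : olzI s i = none := by simp [olzI, hL]
      rw [holz]
      refine Prod.ext ?_ (Prod.ext ?_ ?_)
      · simp only
        rw [backfill_spec _ _ _ _ (by norm_num), hlen]
        exact A_fill s i hi hz _ (by rw [hL])
      · simp [olzI, lzB, hz]
      · simp only [nxtI, lzB, if_pos hz]
        push_cast
        ring
    | some L =>
      have holz : olzI s i = some ((L : Nat) : Int) := by simp [olzI, hL]
      rw [holz]
      have hfd : PySem.Int.floordiv ((L:Int) + (i:Int)) 2 = ((L:Int) + (i:Int))/2 :=
        PySem.Int.floordiv_eq_ediv_of_pos (by norm_num)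
      refine Prod.ext ?_ (Prod.ext ?_ ?_)
      · simp only
        rw [backfill_spec _ _ _ _ (by rw [hfd]; omega), hlen]
        exact A_fill s i hi hz _ (by rw [hL, hfd])
      · simp [olzI, lzB, hz]
      · simp only [nxtI, lzB, if_pos hz]
        push_cast
        ring
  · -- house at i: gets numbered nxt
    simp only [aStep, hget, hz, ne_eq, not_false_eq_true, if_true]
    refine Prod.ext ?_ (Prod.ext ?_ ?_)
    · simp only
      rw [PySem.List.pySetD_natCast]
      apply List.ext_getElem
      · simp [curA]
      · intro k h1 h2
        have hk : k < s.length := by simpa [curA] using h2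
        rw [List.getElem_set]
        simp only [curA, List.getElem_map, List.getElem_range]
        by_cases hki : i = k
        · subst hki
          rw [if_pos rfl, if_pos (by omega)]
          exact (valI_self s i hz).symm
        · rw [if_neg hki]
          by_cases hlt : k < i
          · rw [if_pos hlt, if_pos (by omega)]
            unfold valI
            rw [fzI_succ_ne s (k+1) i hz]
          · rw [if_neg hlt, if_neg (by omega)]
    · simp only [olzI, lzB_succ_ne s i hz]
    · simp only [nxtI, lzB_succ_ne s i hz]
      cases h : lzB s i <;> simp [h] <;> push_cast <;> ring

lemma A_inv (s : List Int) : ∀ i ≤ s.length,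
    (PySem.List.pyRange 0 (i : Int) 1).foldl aStep (s, none, 1)
      = (curA s i, olzI s i, nxtI s i) := by
  intro i
  induction i with
  | zero =>
    intro _
    rw [PySem.List.pyRange_one_eq_nil (by norm_num)]
    simp only [List.foldl_nil, curA, olzI, nxtI, lzB]
    refine Prod.ext ?_ (Prod.ext ?_ ?_)
    · simp only
      have := map_elemAt_range s
      conv_lhs => rw [← this]
      apply List.map_congr_left
      intro j hj
      simp
    · simp
    · simp
  | succ i ih =>
    intro h
    have hcast : ((i+1 : Nat) : Int) = (i : Int) + 1 := by push_cast; ring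
    rw [hcast, PySem.List.pyRange_one_succ_right (by positivity), List.foldl_append,
      ih (by omega), List.foldl_cons, List.foldl_nil, A_step s i (by omega)]

lemma A_eq (s : List Int) : street_counter s = refOut s := by
  unfold street_counter
  rw [A_inv s s.length le_rfl]
  simp only [refOut, curA]
  apply List.map_congr_left
  intro j hj
  rw [if_pos (List.mem_range.mp hj)]

-- elemAt through a single write and through a range-map
lemma elemAt_set (cur : List Int) (k : Nat) (v : Int) (j : Nat) (hk : k < cur.length) :
    elemAt (PySem.List.pySetD cur (k:Int) v) j = if j = k then v else elemAt cur j := by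
  simp only [elemAt, PySem.List.pyGetD_natCast, PySem.List.pySetD_natCast]
  by_cases h : j = k
  · subst h
    rw [List.getD_eq_getElem?_getD, List.getElem?_set_self hk]
    simp
  · rw [if_neg h, List.getD_eq_getElem?_getD, List.getD_eq_getElem?_getD,
      List.getElem?_set_ne (by omega)]

lemma elemAt_mapRange (f : Nat → Int) (n j : Nat) (h : j < n) :
    elemAt ((List.range n).map f) j = f j := by
  simp only [elemAt, PySem.List.pyGetD_natCast]
  rw [PySem.List.getD_map_range _ _ _ _ h]

lemma Rd_succ (s : List Int) (m : Nat) (hm : m < s.length) :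
    Rd s m = if elemAt s m = 0 then 0 else Rd s (m+1) + 1 := by
  unfold Rd
  by_cases hz : elemAt s m = 0
  · rw [fzI_self s m s.length hm hz, if_pos hz]
    simp
  · rw [fzI_shift s m s.length hz, if_neg hz]
    cases h : fzI s (m+1) s.length <;> simp [h] <;> push_cast <;> ring

lemma B_passR (s : List Int) : ∀ m ≤ s.length, ∀ cur : List Int, cur.length = s.length →
    (PySem.List.pyRange ((m : Int) - 1) (-1) (-1)).foldl (bStepR s) (Rd s m, cur)
      = (Rd s 0, (List.range s.length).map (fun j => if j < m then Rd s j else elemAt cur j)) := by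
  intro m
  induction m with
  | zero =>
    intro _ cur hcur
    rw [PySem.List.pyRange_neg_one_eq_nil (by norm_num)]
    simp only [List.foldl_nil]
    refine Prod.ext rfl ?_
    simp only
    conv_lhs => rw [← map_elemAt_range cur, hcur]
    apply List.map_congr_left
    intro j hj
    simp
  | succ m ih =>
    intro h cur hcur
    have hcast : ((m+1 : Nat) : Int) - 1 = (m : Int) := by push_cast; ring
    rw [hcast, PySem.List.pyRange_neg_one_cons (by omega), List.foldl_cons]
    have hget : PySem.List.pyGetD s (m : Int) 0 = elemAt s m := rfl
    have hd : (if PySem.List.pyGetD s (m : Int) 0 = 0 then 0 else Rd s (m+1) + 1) = Rd s m := by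
      rw [hget, ← Rd_succ s m (by omega)]
    simp only [bStepR, hd]
    rw [ih (by omega) _ (by rw [PySem.List.length_pySetD, hcur])]
    refine Prod.ext rfl ?_
    simp only
    apply List.map_congr_left
    intro j hjr
    have hj : j < s.length := List.mem_range.mp hjr
    rw [elemAt_set cur m (Rd s m) j (by omega)]
    by_cases h1 : j < m
    · rw [if_pos h1, if_pos (by omega)]
    · by_cases h2 : j = m
      · subst h2
        rw [if_neg h1, if_pos rfl, if_pos (by omega)]
      · rw [if_neg h1, if_neg h2, if_neg (by omega)]

lemma Ld_zero (s : List Int) : Ld s 0 = (s.length : Int) + 1 := by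
  simp [Ld, lzB]

lemma Rd_len (s : List Int) : Rd s s.length = (s.length : Int) + 1 := by
  rw [Rd, fzI_eq_none_of_le s s.length s.length le_rfl]
  simp

lemma B_passL (s : List Int) (right : List Int)
    (hr : right = (List.range s.length).map (Rd s)) : ∀ i ≤ s.length,
    (PySem.List.pyRange 0 (i : Int) 1).foldl (bStepL right) (Ld s 0, s)
      = (Ld s i, (List.range s.length).map (fun j => if j < i then outB s j else elemAt s j)) := by
  intro i
  induction i with
  | zero =>
    intro _
    rw [PySem.List.pyRange_one_eq_nil (by norm_num)]
    simp only [List.foldl_nil]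
    refine Prod.ext rfl ?_
    simp only
    conv_lhs => rw [← map_elemAt_range s]
    apply List.map_congr_left
    intro j hj
    simp
  | succ i ih =>
    intro h
    have hcast : ((i+1 : Nat) : Int) = (i : Int) + 1 := by push_cast; ring
    rw [hcast, PySem.List.pyRange_one_succ_right (by positivity), List.foldl_append,
      ih (by omega), List.foldl_cons, List.foldl_nil]
    have hi : i < s.length := by omega
    have hget : PySem.List.pyGetD ((List.range s.length).map
        (fun j => if j < i then outB s j else elemAt s j)) (i : Int) 0 = elemAt s i := by
      have := elemAt_mapRange (fun j => if j < i then outB s j else elemAt s j) s.length i hi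
      simp only [elemAt, PySem.List.pyGetD_natCast] at this ⊢
      rw [this, if_neg (by omega)]
    have hrt : PySem.List.pyGetD right (i : Int) 0 = Rd s i := by
      rw [hr]
      have := elemAt_mapRange (Rd s) s.length i hi
      simp only [elemAt, PySem.List.pyGetD_natCast] at this ⊢
      rw [this]
    have hd : (if PySem.List.pyGetD ((List.range s.length).map
        (fun j => if j < i then outB s j else elemAt s j)) (i : Int) 0 = 0
        then 0 else Ld s i + 1) = Ld s (i+1) := by
      rw [hget, ← Ld_succ s i]
    simp only [bStepL, hd, hrt]
    refine Prod.ext rfl ?_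
    simp only
    apply List.ext_getElem
    · simp [PySem.List.length_pySetD]
    · intro k h1 h2
      have hk : k < s.length := by simpa using h2
      have hlen : ((List.range s.length).map
          (fun j => if j < i then outB s j else elemAt s j)).length = s.length := by simp
      simp only [PySem.List.pySetD_natCast, List.getElem_set, List.getElem_map,
        List.getElem_range]
      by_cases hki : i = k
      · subst hki
        rw [if_pos rfl, if_pos (by omega)]
        rfl
      · rw [if_neg hki]
        by_cases hlt : k < i
        · rw [if_pos hlt, if_pos (by omega)]
        · rw [if_neg hlt, if_neg (by omega)]

lemma B_passSimple (s : List Int) : ∀ i ≤ s.length,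
    (PySem.List.pyRange 0 (i : Int) 1).foldl (fun cur k => PySem.List.pySetD cur k (k + 1)) s
      = (List.range s.length).map (fun j => if j < i then (j : Int) + 1 else elemAt s j) := by
  intro i
  induction i with
  | zero =>
    intro _
    rw [PySem.List.pyRange_one_eq_nil (by norm_num)]
    simp only [List.foldl_nil]
    conv_lhs => rw [← map_elemAt_range s]
    apply List.map_congr_left
    intro j hj
    simp
  | succ i ih =>
    intro h
    have hcast : ((i+1 : Nat) : Int) = (i : Int) + 1 := by push_cast; ring
    rw [hcast, PySem.List.pyRange_one_succ_right (by positivity), List.foldl_append,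
      ih (by omega), List.foldl_cons, List.foldl_nil]
    apply List.ext_getElem
    · simp [PySem.List.length_pySetD]
    · intro k h1 h2
      have hk : k < s.length := by simpa using h2
      simp only [PySem.List.pySetD_natCast, List.getElem_set, List.getElem_map,
        List.getElem_range]
      by_cases hki : i = k
      · subst hki
        rw [if_pos rfl, if_pos (by omega)]
      · rw [if_neg hki]
        by_cases hlt : k < i
        · rw [if_pos hlt, if_pos (by omega)]
        · rw [if_neg hlt, if_neg (by omega)]

lemma exists_zero_of_contains (s : List Int) (h0 : s.contains 0 = true) :
    ∃ k, k < s.length ∧ elemAt s k = 0 := by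
  rcases List.mem_iff_getElem.mp (List.contains_iff_mem.mp h0) with ⟨k, hk, hke⟩
  exact ⟨k, hk, by rw [elemAt_eq s k hk, hke]⟩

lemma outB_eq (s : List Int) (h0 : s.contains 0 = true) (j : Nat) (hj : j < s.length) :
    outB s j = valI s s.length j := by
  unfold outB valI
  by_cases hzj : elemAt s j = 0
  · rw [if_pos hzj]
    have hL : Ld s (j+1) = 0 := by rw [Ld_succ, if_pos hzj]
    have hR : Rd s j = 0 := by
      unfold Rd
      rw [fzI_self s j s.length hj hzj]
      simp
    rw [hL, hR]
    simp
  · rw [if_neg hzj]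
    have hL : Ld s (j+1) = Ld s j + 1 := by rw [Ld_succ, if_neg hzj]
    rw [hL]
    unfold Rd
    rw [fzI_shift s j s.length hzj]
    cases hlj : lzB s j with
    | some L =>
      have hLj : L < j := (lzB_lt s j L hlj).1
      cases hfj : fzI s (j+1) s.length with
      | some z =>
        rcases fzI_spec s (j+1) s.length z hfj with ⟨hz1, hz2, hz3⟩
        simp only [Ld, hlj, min_def]
        split_ifs <;> omega
      | none =>
        simp only [Ld, hlj, min_def]
        split_ifs <;> omega
    | none =>
      cases hfj : fzI s (j+1) s.length with
      | some z =>
        rcases fzI_spec s (j+1) s.length z hfj with ⟨hz1, hz2, hz3⟩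
        simp only [Ld, hlj, min_def]
        split_ifs <;> omega
      | none =>
        exfalso
        rcases exists_zero_of_contains s h0 with ⟨k, hk, hke⟩
        rcases lt_trichotomy k j with hkj | rfl | hkj
        · exact lzB_none s j hlj k hkj hke
        · exact hzj hke
        · exact fzI_none s (j+1) s.length hfj k (by omega) hk hke

lemma noZero_val (s : List Int) (h0 : s.contains 0 = false) (j : Nat) (hj : j < s.length) :
    valI s s.length j = (j : Int) + 1 := by
  have hall : ∀ k, k < s.length → elemAt s k ≠ 0 := by
    intro k hk hke
    have : (0 : Int) ∈ s := by
      rw [elemAt_eq s k hk] at hke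
      exact hke ▸ List.getElem_mem hk
    simp [List.contains_iff_mem, this] at h0
  have hzj : elemAt s j ≠ 0 := hall j hj
  have hlj : lzB s j = none := by
    cases hlj : lzB s j with
    | none => rfl
    | some L =>
      rcases lzB_lt s j L hlj with ⟨h1, h2⟩
      exact absurd h2 (hall L (by omega))
  have hfj : fzI s (j+1) s.length = none := by
    cases hfj : fzI s (j+1) s.length with
    | none => rfl
    | some z =>
      rcases fzI_spec s (j+1) s.length z hfj with ⟨h1, h2, h3⟩
      exact absurd h3 (hall z h2)
  simp [valI, hzj, hlj, hfj]

lemma B_eq (s : List Int) : street_counter_alt s = refOut s := by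
  simp only [street_counter_alt]
  by_cases hc : s.contains 0 = true
  · rw [if_neg (fun h => h hc)]
    have hrep : (List.replicate s.length (0:Int)).length = s.length := by simp
    have h1 : (PySem.List.pyRange ((s.length:Int) - 1) (-1) (-1)).foldl (bStepR s)
        ((s.length:Int) + 1, List.replicate s.length 0)
        = (Rd s 0, (List.range s.length).map
            (fun j => if j < s.length then Rd s j else elemAt (List.replicate s.length (0:Int)) j)) := by
      rw [← Rd_len s]
      exact B_passR s s.length le_rfl _ hrep
    have hrt : (List.range s.length).map
        (fun j => if j < s.length then Rd s j else elemAt (List.replicate s.length (0:Int)) j)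
        = (List.range s.length).map (Rd s) := by
      apply List.map_congr_left
      intro j hj
      rw [if_pos (List.mem_range.mp hj)]
    rw [h1]
    simp only
    rw [hrt, ← Ld_zero s, B_passL s _ rfl s.length le_rfl]
    simp only [refOut]
    apply List.map_congr_left
    intro j hj
    rw [if_pos (List.mem_range.mp hj), outB_eq s hc j (List.mem_range.mp hj)]
  · rw [if_pos hc]
    have hcf : s.contains 0 = false := by
      revert hc
      cases s.contains 0 <;> simp
    rw [B_passSimple s s.length le_rfl]
    simp only [refOut]
    apply List.map_congr_left
    intro j hj
    rw [if_pos (List.mem_range.mp hj), noZero_val s hcf j (List.mem_range.mp hj)]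

-- ===== VERDICT (by name: the statement is the Claim_ definition above) =====
theorem street_counter_spec : Claim_equal_street_counter := by
  intro s _
  unfold Spec_street_counter
  rw [A_eq, B_eq]
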